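-- pv_equiv track=rewrite | github.com/agus-videla/static-site-generator | src/block_utils.py | count_hashtags
-- ===== SOURCE A (Python) =====
-- def count_hashtags(text):
--     acc = 0
--     for c in text.lstrip():
--         if c == "#":
--             acc += 1
--         else:
--             break
--     return acc
-- ===== SOURCE B (Python) =====
-- def count_hashtags(text):
--     s = text.lstrip()
--     return len(s) - len(s.lstrip("#"))
-- ===== Notes on version B (the rewrite author's own statement) =====
-- stated objective: simpler
-- what changed: Replaced the explicit character loop with accumulator and break by a length-difference computation: the count is the lstripped length minus the length after additionally stripping leading hash characters.
import Mathlib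
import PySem

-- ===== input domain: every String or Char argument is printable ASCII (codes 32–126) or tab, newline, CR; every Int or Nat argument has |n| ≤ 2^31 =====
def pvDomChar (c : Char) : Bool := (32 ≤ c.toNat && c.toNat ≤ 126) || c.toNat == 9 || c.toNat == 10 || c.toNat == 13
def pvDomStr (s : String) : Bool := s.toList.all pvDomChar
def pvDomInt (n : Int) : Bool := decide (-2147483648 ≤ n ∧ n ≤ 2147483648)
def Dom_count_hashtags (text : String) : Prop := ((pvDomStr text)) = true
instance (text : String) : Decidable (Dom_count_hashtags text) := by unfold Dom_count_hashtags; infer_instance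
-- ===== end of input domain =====

-- B computes the count as a length difference (len after lstrip minus len after lstrip('#'))
-- instead of A's character loop with accumulator and break; objective: simpler.

-- ===== PORT A =====
-- the for-loop with `acc` and `break`: recursion over the remaining characters
def pvLoopA : List Char → Int → Int
  | [], acc => acc
  | c :: rest, acc => if c = '#' then pvLoopA rest (acc + 1) else acc

def count_hashtags (text : String) : Int :=
  pvLoopA (PySem.Chars.lstrip text.toList) 0

-- ===== PORT B =====
-- s.lstrip('#') ported by hand as dropWhile (· = '#'): exact, since Python's
-- lstrip(chars) removes exactly the longest leading run of characters from chars.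
def count_hashtags_alt (text : String) : Int :=
  let s := PySem.Chars.lstrip text.toList
  (s.length : Int) - ((s.dropWhile (· = '#')).length : Int)

-- ===== PRECONDITION & SPEC =====
def Spec_count_hashtags (text : String) (out : Int) : Prop := out = count_hashtags_alt text
instance (text : String) (out : Int) : Decidable (Spec_count_hashtags text out) := by unfold Spec_count_hashtags; infer_instance

-- ===== CLAIM (what is proved, stated in full; the proofs are below) =====
def Claim_equal_count_hashtags : Prop := ∀ (text : String), Dom_count_hashtags text → Spec_count_hashtags text (count_hashtags text)

-- ===== LEMMAS AND PROOFS =====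
theorem pvLoopA_eq (cs : List Char) (acc : Int) :
    pvLoopA cs acc = acc + ((cs.length : Int) - ((cs.dropWhile (· = '#')).length : Int)) := by
  induction cs generalizing acc with
  | nil => simp [pvLoopA]
  | cons c rest ih =>
    by_cases h : c = '#'
    · simp [pvLoopA, h, List.dropWhile, ih]
      have := List.length_dropWhile_le (p := fun x => x = '#') rest
      ring
    · simp [pvLoopA, h, List.dropWhile]

-- ===== VERDICT (by name: the statement is the Claim_ definition above) =====
theorem count_hashtags_spec : Claim_equal_count_hashtags := by
  intro text _
  unfold Spec_count_hashtags count_hashtags count_hashtags_alt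
  rw [pvLoopA_eq]
  simp
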